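-- pv_equiv track=rewrite | github.com/Taruu/backrooms-scripts | utls/wikidot_normalize.py | replace_underscores
-- ===== SOURCE A (Python) =====
-- def replace_underscores(text: str) -> str:
--     matches = []
--     prev_colon = False
--
--     # Finding matching, non-conforming underscores
--     for idx, ch in enumerate(text):
--         if ch == '_':
--             # If it's not the leading underscore, or after a category,
--             # push an index to replace it
--             if idx > 0 and not prev_colon:
--                 matches.append(idx)
--         prev_colon = ch == ':'
--
--     # Replace the underscores with dashes
--     text_list = list(text)  # Convert string to list to mutate it
--     for idx in matches:
--         text_list[idx] = '-'
--
--     return ''.join(text_list)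
-- ===== SOURCE B (Python) =====
-- def replace_underscores(text: str) -> str:
--     # Split on ':'.  A character is preceded by ':' exactly when it heads a
--     # non-first segment, and index 0 heads the first segment; so keep each
--     # segment's first character, bulk-replace '_' -> '-' in the rest, rejoin.
--     return ':'.join(seg[:1] + seg[1:].replace('_', '-') for seg in text.split(':'))
-- ===== Notes on version B (the rewrite author's own statement) =====
-- stated objective: faster
-- what changed: Replaced the character-indexed collect-then-mutate scan with a staged split/replace/join pipeline: split on the colon separator, keep each segment's first character (covers index 0 and every char right after a colon), bulk str.replace the rest, and rejoin.
import Mathlib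
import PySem

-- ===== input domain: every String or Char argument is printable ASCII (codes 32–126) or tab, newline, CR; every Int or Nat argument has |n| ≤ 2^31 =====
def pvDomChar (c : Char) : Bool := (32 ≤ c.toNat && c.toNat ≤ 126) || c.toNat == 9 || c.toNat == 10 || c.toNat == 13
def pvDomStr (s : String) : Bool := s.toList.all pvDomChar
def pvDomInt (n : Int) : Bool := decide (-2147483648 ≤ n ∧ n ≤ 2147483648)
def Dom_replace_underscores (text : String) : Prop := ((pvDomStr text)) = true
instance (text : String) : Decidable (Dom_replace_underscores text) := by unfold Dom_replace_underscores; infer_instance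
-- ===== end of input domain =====

-- B replaces A's per-character collect-then-mutate scan by a staged split/replace/join pipeline (measured faster by a constant factor: the bulk operations avoid per-char Python work).

-- ===== PORT A =====
def replace_underscores (text : String) : String :=
  -- matches/prev_colon loop over enumerate(text)
  let st := (PySem.List.enumerate text.toList 0).foldl
    (fun (st : List Int × Bool) (p : Int × Char) =>
      ((if p.2 = '_' ∧ p.1 > 0 ∧ st.2 = false then st.1 ++ [p.1] else st.1),
       decide (p.2 = ':')))
    ([], false)
  -- text_list = list(text); for idx in matches: text_list[idx] = '-'
  let text_list := st.1.foldl (fun L i => PySem.List.pySetD L i '-') text.toList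
  String.mk text_list

-- ===== PORT B =====
def replace_underscores_alt (text : String) : String :=
  -- ':'.join(seg[:1] + seg[1:].replace('_', '-') for seg in text.split(':'))
  String.mk (PySem.Chars.join [':']
    ((PySem.Chars.splitOn text.toList [':']).map
      (fun seg => PySem.List.slice seg none (some 1) ++
                  PySem.Chars.replace (PySem.List.slice seg (some 1) none) ['_'] ['-'])))

-- ===== PRECONDITION & SPEC =====
def Spec_replace_underscores (text : String) (out : String) : Prop := out = replace_underscores_alt text
instance (text : String) (out : String) : Decidable (Spec_replace_underscores text out) := by unfold Spec_replace_underscores; infer_instance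

-- ===== CLAIM (what is proved, stated in full; the proofs are below) =====
def Claim_equal_replace_underscores : Prop := ∀ (text : String), Dom_replace_underscores text → Spec_replace_underscores text (replace_underscores text)

-- ===== LEMMAS AND PROOFS =====

/-- The indices A's first loop collects, starting at offset `k` with flag `pc`. -/
def goodIdx (k : Int) (pc : Bool) : List Char → List Int
  | [] => []
  | c :: r => (if c = '_' ∧ k > 0 ∧ pc = false then [k] else []) ++ goodIdx (k + 1) (decide (c = ':')) r

/-- The tail (everything after the first char) of the common result, driven by the
    "previous char was a colon" flag. -/
def bGo (pc : Bool) : List Char → List Char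
  | [] => []
  | c :: r => (if c = '_' ∧ pc = false then '-' else c) :: bGo (decide (c = ':')) r

theorem foldl_enumerate_eq_goodIdx (l : List Char) (k : Int) (ms : List Int) (pc : Bool) :
    ((PySem.List.enumerate l k).foldl
      (fun (st : List Int × Bool) (p : Int × Char) =>
        ((if p.2 = '_' ∧ p.1 > 0 ∧ st.2 = false then st.1 ++ [p.1] else st.1),
         decide (p.2 = ':')))
      (ms, pc)).1 = ms ++ goodIdx k pc l := by
  induction l generalizing k ms pc with
  | nil => simp [PySem.List.enumerate_nil, goodIdx]
  | cons c r ih =>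
      rw [PySem.List.enumerate_cons]
      simp only [List.foldl_cons, goodIdx]
      rw [ih]
      by_cases h : c = '_' ∧ k > 0 ∧ pc = false
      · simp [h, List.append_assoc]
      · simp [h]

theorem foldl_set_goodIdx (r pre : List Char) (pc : Bool) (hpre : pre ≠ []) :
    (goodIdx (pre.length : Int) pc r).foldl (fun L i => PySem.List.pySetD L i '-') (pre ++ r)
      = pre ++ bGo pc r := by
  induction r generalizing pre pc with
  | nil => simp [goodIdx, bGo]
  | cons c r ih =>
      have hk : ((pre.length : Int) > 0) := by
        have : 0 < pre.length := List.length_pos_of_ne_nil hpre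
        exact_mod_cast this
      by_cases h : c = '_' ∧ pc = false
      · have hcond : c = '_' ∧ (pre.length : Int) > 0 ∧ pc = false := ⟨h.1, hk, h.2⟩
        simp only [goodIdx, if_pos hcond, List.cons_append, List.nil_append, List.foldl_cons]
        have hset : PySem.List.pySetD (pre ++ c :: r) (pre.length : Int) '-'
            = (pre ++ ['-']) ++ r := by
          rw [PySem.List.pySetD_natCast, List.set_append]
          simp
        rw [hset]
        have hlen : ((pre.length : Int) + 1) = (((pre ++ ['-']).length : Nat) : Int) := by
          simp
        rw [hlen, ih (pre ++ ['-']) (decide (c = ':')) (by simp)]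
        simp [bGo, h.1, h.2]
      · have hcond : ¬ (c = '_' ∧ (pre.length : Int) > 0 ∧ pc = false) := by
          intro hc; exact h ⟨hc.1, hc.2.2⟩
        simp only [goodIdx, if_neg hcond, List.nil_append]
        have hsplit : pre ++ c :: r = (pre ++ [c]) ++ r := by simp
        have hlen : ((pre.length : Int) + 1) = (((pre ++ [c]).length : Nat) : Int) := by simp
        rw [hsplit, hlen, ih (pre ++ [c]) (decide (c = ':')) (by simp)]
        have hc : ¬ (c = '_' ∧ pc = false) := h
        simp only [bGo]
        rw [if_neg hc]
        simp

/-- Replacement applied to one character (what str.replace('_','-') does pointwise). -/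
def subU (c : Char) : Char := if c = '_' then '-' else c

/-- What B computes for one segment: keep the head, replace in the rest. -/
def gSeg (s : List Char) : List Char := s.take 1 ++ (s.drop 1).map subU

/-- ':' plus the processed remaining segments (the join's tail). -/
def tailJoin : List (List Char) → List Char
  | [] => []
  | s :: T => ':' :: (gSeg s ++ tailJoin T)

theorem replace_go_eq (fuel : Nat) (l acc : List Char) (h : l.length ≤ fuel) :
    PySem.Chars.replace.go ['_'] ['-'] fuel l acc = acc.reverse ++ l.map subU := by
  induction fuel generalizing l acc with
  | zero =>
      have : l = [] := List.eq_nil_of_length_eq_zero (Nat.le_zero.mp h)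
      subst this; simp [PySem.Chars.replace.go]
  | succ n ih =>
      cases l with
      | nil => simp [PySem.Chars.replace.go]
      | cons c t =>
          simp only [PySem.Chars.replace.go, List.isPrefixOf]
          by_cases hc : c = '_'
          · simp only [hc]
            rw [if_pos (by simp)]
            rw [ih _ _ (by simpa using Nat.le_of_succ_le_succ h)]
            simp [subU]
          · rw [if_neg (by simp; exact fun e => hc e.symm)]
            rw [ih _ _ (by simpa using Nat.le_of_succ_le_succ h)]
            simp [subU, hc]

theorem replace_eq_map (s : List Char) :
    PySem.Chars.replace s ['_'] ['-'] = s.map subU := by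
  unfold PySem.Chars.replace
  rw [if_neg (by simp)]
  rw [replace_go_eq s.length s [] (le_refl _)]
  simp

theorem splitOn_go_eq (l : List Char) (fuel : Nat) (cur : List Char)
    (acc : List (List Char)) (h : l.length < fuel) :
    PySem.Chars.splitOn.go [':'] fuel l cur acc
      = acc.reverse ++ List.modifyHead (fun x => cur.reverse ++ x) (l.splitOnP (· == ':')) := by
  induction l generalizing fuel cur acc with
  | nil =>
      cases fuel with
      | zero => omega
      | succ n => simp [PySem.Chars.splitOn.go, List.splitOnP_nil]
  | cons c t ih =>
      cases fuel with
      | zero => omega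
      | succ n =>
          simp only [PySem.Chars.splitOn.go, List.isPrefixOf]
          rw [List.splitOnP_cons]
          by_cases hc : c = ':'
          · subst hc
            rw [if_pos (by simp)]
            rw [show List.drop [':'].length (':' :: t) = t from rfl]
            rw [ih n [] (cur.reverse :: acc) (by simpa using Nat.lt_of_succ_lt_succ h)]
            obtain ⟨s, T, hsT⟩ : ∃ s T, t.splitOnP (· == ':') = s :: T := by
              cases hst : t.splitOnP (· == ':') with
              | nil => exact absurd hst (List.splitOnP_ne_nil _ _)
              | cons s T => exact ⟨s, T, rfl⟩
            simp [hsT]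
          · rw [if_neg (by simp; exact fun e => hc e.symm)]
            rw [ih n (c :: cur) acc (by simpa using Nat.lt_of_succ_lt_succ h)]
            obtain ⟨s, T, hsT⟩ : ∃ s T, t.splitOnP (· == ':') = s :: T := by
              cases hst : t.splitOnP (· == ':') with
              | nil => exact absurd hst (List.splitOnP_ne_nil _ _)
              | cons s T => exact ⟨s, T, rfl⟩
            rw [if_neg (by simp [hc])]
            simp [hsT]

theorem splitOn_eq_splitOnP (l : List Char) :
    PySem.Chars.splitOn l [':'] = l.splitOnP (· == ':') := by
  unfold PySem.Chars.splitOn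
  rw [splitOn_go_eq l (l.length + 1) [] [] (by omega)]
  obtain ⟨s, T, hsT⟩ : ∃ s T, l.splitOnP (· == ':') = s :: T := by
    cases hst : l.splitOnP (· == ':') with
    | nil => exact absurd hst (List.splitOnP_ne_nil _ _)
    | cons s T => exact ⟨s, T, rfl⟩
  simp [hsT]

theorem intercalate_eq_tailJoin (T : List (List Char)) (h : List Char) :
    List.intercalate [':'] ((h :: T).map gSeg) = gSeg h ++ tailJoin T := by
  induction T generalizing h with
  | nil => simp [List.intercalate, tailJoin]
  | cons s T ih =>
      simp only [List.map_cons] at ih ⊢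
      rw [show List.intercalate [':'] (gSeg h :: gSeg s :: T.map gSeg)
            = gSeg h ++ ':' :: List.intercalate [':'] (gSeg s :: T.map gSeg) by
          simp [List.intercalate, List.intersperse]]
      rw [ih s]
      simp [tailJoin]

theorem segments_eq_bGo (r : List Char) (h : List Char) (T : List (List Char))
    (hsp : r.splitOnP (· == ':') = h :: T) :
    h.map subU ++ tailJoin T = bGo false r ∧ gSeg h ++ tailJoin T = bGo true r := by
  induction r generalizing h T with
  | nil =>
      rw [List.splitOnP_nil] at hsp
      obtain ⟨rfl, rfl⟩ : h = [] ∧ T = [] := by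
        injection hsp with h1 h2; exact ⟨h1.symm, h2.symm⟩
      simp [tailJoin, bGo, gSeg]
  | cons d t ih =>
      obtain ⟨s, T', hsT⟩ : ∃ s T', t.splitOnP (· == ':') = s :: T' := by
        cases hst : t.splitOnP (· == ':') with
        | nil => exact absurd hst (List.splitOnP_ne_nil _ _)
        | cons s T' => exact ⟨s, T', rfl⟩
      rw [List.splitOnP_cons, hsT] at hsp
      by_cases hd : d = ':'
      · subst hd
        rw [if_pos (by simp)] at hsp
        obtain ⟨rfl, rfl⟩ : h = [] ∧ T = s :: T' := by
          injection hsp with h1 h2; exact ⟨h1.symm, h2.symm⟩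
        have hIH := (ih _ _ hsT).2
        constructor
        · show ':' :: (gSeg s ++ tailJoin T') = bGo false (':' :: t)
          rw [hIH]
          simp [bGo]
        · show ':' :: (gSeg s ++ tailJoin T') = bGo true (':' :: t)
          rw [hIH]
          simp [bGo]
      · rw [if_neg (by simp [hd]), List.modifyHead_cons] at hsp
        obtain ⟨rfl, rfl⟩ : h = d :: s ∧ T = T' := by
          injection hsp with h1 h2; exact ⟨h1.symm, h2.symm⟩
        have hIH := (ih _ _ hsT).1
        constructor
        · simp only [List.map_cons, List.cons_append, bGo]
          rw [hIH]
          simp [subU, hd]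
        · show List.take 1 (d :: s) ++ (List.map subU s ++ tailJoin T) = bGo true (d :: t)
          rw [hIH]
          simp [bGo, hd]

-- ===== VERDICT (by name: the statement is the Claim_ definition above) =====
theorem replace_underscores_spec : Claim_equal_replace_underscores := by
  intro text _
  unfold Spec_replace_underscores replace_underscores replace_underscores_alt
  simp only []
  rw [foldl_enumerate_eq_goodIdx]
  have hB : ∀ seg : List Char,
      PySem.List.slice seg none (some 1) ++
        PySem.Chars.replace (PySem.List.slice seg (some 1) none) ['_'] ['-'] = gSeg seg := by
    intro seg
    rw [PySem.List.slice_to seg (by norm_num), PySem.List.slice_from seg (by norm_num),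
      replace_eq_map]
    rfl
  rw [splitOn_eq_splitOnP]
  cases hl : text.toList with
  | nil =>
      simp only [goodIdx, List.nil_append, List.foldl_nil, List.splitOnP_nil]
      simp [PySem.Chars.join, hB, List.intercalate, gSeg]
  | cons c r =>
      simp only [List.nil_append, goodIdx]
      have h0 : ¬ (c = '_' ∧ (0 : Int) > 0 ∧ True) := by
        intro h; exact absurd h.2.1 (by norm_num)
      rw [if_neg h0]
      have h1 : ((0 : Int) + 1) = (((([c] : List Char)).length : Nat) : Int) := by simp
      have hA := foldl_set_goodIdx r [c] (decide (c = ':')) (by simp)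
      simp only [List.nil_append, List.singleton_append] at hA ⊢
      rw [h1, hA]
      -- B side
      obtain ⟨s, T, hsT⟩ : ∃ s T, r.splitOnP (· == ':') = s :: T := by
        cases hst : r.splitOnP (· == ':') with
        | nil => exact absurd hst (List.splitOnP_ne_nil _ _)
        | cons s T => exact ⟨s, T, rfl⟩
      rw [List.splitOnP_cons]
      by_cases hc : c = ':'
      · subst hc
        rw [if_pos (by simp), hsT]
        have : PySem.Chars.join [':']
            (([] :: s :: T).map (fun seg => PySem.List.slice seg none (some 1) ++
              PySem.Chars.replace (PySem.List.slice seg (some 1) none) ['_'] ['-']))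
            = List.intercalate [':'] (([] :: s :: T).map gSeg) := by
          simp only [List.map_cons]
          simp [PySem.Chars.join, hB]
        rw [this]
        rw [show ([] :: s :: T).map gSeg = gSeg [] :: (s :: T).map gSeg from rfl]
        rw [show List.intercalate [':'] (gSeg [] :: (s :: T).map gSeg)
              = gSeg [] ++ ':' :: List.intercalate [':'] ((s :: T).map gSeg) by
            simp only [List.map_cons]
            simp [List.intercalate, List.intersperse]]
        rw [intercalate_eq_tailJoin T s, (segments_eq_bGo r s T hsT).2]
        simp [gSeg]
      · rw [if_neg (by simp [hc]), hsT, List.modifyHead_cons]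
        have : PySem.Chars.join [':']
            (((c :: s) :: T).map (fun seg => PySem.List.slice seg none (some 1) ++
              PySem.Chars.replace (PySem.List.slice seg (some 1) none) ['_'] ['-']))
            = List.intercalate [':'] (((c :: s) :: T).map gSeg) := by
          simp only [List.map_cons]
          simp [PySem.Chars.join, hB]
        rw [this, intercalate_eq_tailJoin T (c :: s)]
        have hseg : gSeg (c :: s) = c :: s.map subU := by
          simp [gSeg]
        rw [hseg]
        rw [show (c :: s.map subU) ++ tailJoin T = c :: (s.map subU ++ tailJoin T) from rfl]
        rw [(segments_eq_bGo r s T hsT).1]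
        simp [hc]
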